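-- pv_equiv track=rewrite | github.com/jkpr/advent-of-code-2016 | aoc2016/day04/__init__.py | room_is_real
-- ===== SOURCE A (Python) =====
-- from collections import (
--     Counter,
--     defaultdict,
--     deque,
--     namedtuple,
-- )
--
-- def room_is_real(line: str) -> bool:
--     bracket = line.find("[")
--     code = line[:bracket]
--     counter = Counter(a for a in code if a.isalpha())
--     inverse = {}
--     for k, v in counter.items():
--         current = inverse.get(v, list())
--         current.append(k)
--         inverse[v] = sorted(current)
--     result = []
--     for i in range(max(inverse), 0, -1):
--         result.extend(inverse.get(i, list()))
--     key = ''.join(result[:5])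
--     checksum = line[(bracket + 1):(bracket + 6)]
--     return key == checksum
-- ===== SOURCE B (Python) =====
-- from collections import Counter
--
-- def room_is_real(line: str) -> bool:
--     bracket = line.find("[")
--     counter = Counter(a for a in line[:bracket] if a.isalpha())
--     top = max(counter.values())
--     ordered = sorted(counter, key=lambda c: (top - counter[c], c))
--     return ''.join(ordered[:5]) == line[bracket + 1:bracket + 6]
-- ===== Notes on version B (the rewrite author's own statement) =====
-- stated objective: alternative
-- what changed: B replaces A's inverse count->letters bucket dict plus descending count-range concatenation by one direct sort of the distinct letters keyed by (top count - count, letter), keeping only max(counter.values()) from A's aggregation.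
import Mathlib
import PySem

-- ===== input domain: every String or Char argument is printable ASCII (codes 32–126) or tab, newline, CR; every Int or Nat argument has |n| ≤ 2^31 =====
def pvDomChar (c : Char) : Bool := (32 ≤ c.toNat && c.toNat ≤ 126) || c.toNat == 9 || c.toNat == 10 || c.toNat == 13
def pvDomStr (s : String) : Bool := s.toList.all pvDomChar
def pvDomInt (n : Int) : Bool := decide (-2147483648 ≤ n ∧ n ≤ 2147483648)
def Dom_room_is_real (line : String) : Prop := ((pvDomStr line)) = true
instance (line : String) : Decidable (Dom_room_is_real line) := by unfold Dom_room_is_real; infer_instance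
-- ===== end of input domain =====

-- B sorts the distinct letters once by rank (top count − count, letter) instead of A's inverse
-- count→letters bucket dict walked over a descending count range; the return value is proved
-- equal on every line whose part before the first '[' contains a letter (elsewhere both raise).

-- helpers shared by both ports: the two Pythons begin with the same two lines
-- (bracket = line.find("["); counter over the alphabetic chars of line[:bracket])
-- and both end comparing against the same slice line[bracket+1:bracket+6]
def pvBracket (line : String) : Int := PySem.Str.find line "["
def pvCode (line : String) : List Char :=
  (PySem.Str.slice line none (some (pvBracket line))).toList.filter (fun a => PySem.Chars.isalpha a)
def pvCounter (line : String) : PySem.Dict Char Int := PySem.Dict.counter (pvCode line)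


-- ===== PORT A =====
def pvInverse (line : String) : PySem.Dict Int (List Char) :=
  (pvCounter line).items.foldl
    (fun d kv => d.insert kv.2 (PySem.List.sorted (d.getD kv.2 [] ++ [kv.1]) (fun c => c) false))
    PySem.Dict.empty
def pvChecksum (line : String) : List Char :=
  (PySem.Str.slice line (some (pvBracket line + 1)) (some (pvBracket line + 6))).toList

def room_is_real (line : String) : Bool :=
  match PySem.List.max? (pvInverse line).keys (fun i => i) with
  | none => false
  | some m =>
    ((PySem.List.pyRange m 0 (-1)).foldl (fun acc i => acc ++ (pvInverse line).getD i []) []).take 5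
      == pvChecksum line


-- ===== PORT B =====
def room_is_real_alt (line : String) : Bool :=
  match PySem.List.max? (pvCounter line).values (fun v => v) with
  | none => false   -- Python's max() raises ValueError here; excluded by Pre_
  | some top =>
    (PySem.List.sorted2 (pvCounter line).keys
        (fun c => top - (pvCounter line).getD c 0) (fun c => c) false).take 5
      == pvChecksum line


-- ===== PRECONDITION & SPEC =====
-- Pre_ excludes exactly the lines on which both Pythons raise ValueError (max() of an empty
-- collection): those whose part before the first '[' contains no alphabetic character.
def Pre_room_is_real (line : String) : Prop := pvCode line ≠ []
instance (line : String) : Decidable (Pre_room_is_real line) := by unfold Pre_room_is_real; infer_instance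
def pvWitness_room_is_real : String := "abcde[abcde]"

def Spec_room_is_real (line : String) (out : Bool) : Prop := out = room_is_real_alt line
instance (line : String) (out : Bool) : Decidable (Spec_room_is_real line out) := by unfold Spec_room_is_real; infer_instance

-- ===== CLAIM (what is proved, stated in full; the proofs are below) =====
def Claim_equal_room_is_real : Prop := ∀ (line : String), Dom_room_is_real line → Pre_room_is_real line → Spec_room_is_real line (room_is_real line)

-- ===== LEMMAS AND PROOFS =====
def pvCnt (F : List Char) (c : Char) : Int := (F.count c : Int)
def pvBucketL (F : List Char) (i : Int) : List Char :=
  PySem.List.sorted ((PySem.Set.ofList F).filter (fun c => pvCnt F c == i)) (fun c => c) false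
def pvKey (m : Int) (F : List Char) (c : Char) : Lex (Int × Char) := toLex (m - pvCnt F c, c)

theorem pv_sorted2_lex (xs : List Char) (k1 : Char → Int) :
    PySem.List.sorted2 xs k1 (fun c => c) false
      = PySem.List.sorted xs (fun c => toLex (k1 c, c)) false := by
  have hfun : (fun a b : Char => decide (k1 a < k1 b) || (!decide (k1 b < k1 a) && decide (a < b)))
      = (fun a b : Char => decide (toLex (k1 a, a) < toLex (k1 b, b))) := by
    funext a b
    by_cases h1 : k1 a < k1 b <;> by_cases h2 : k1 b < k1 a <;> by_cases h3 : a < b <;>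
      simp [h1, h2, h3, Prod.Lex.toLex_lt_toLex] <;> omega
  show List.foldl (fun acc x => PySem.List.insertBy
      (fun a b : Char => decide (k1 a < k1 b) || (!decide (k1 b < k1 a) && decide (a < b))) x acc) [] xs
    = List.foldl (fun acc x => PySem.List.insertBy
      (fun a b : Char => decide (toLex (k1 a, a) < toLex (k1 b, b))) x acc) [] xs
  rw [hfun]

theorem pv_inv_bucket (l : List (Char × Int)) :
    ∀ (d : PySem.Dict Int (List Char)),
      (∀ j, d.getD j [] = PySem.List.sorted (d.getD j []) (fun c => c) false) →
      ∀ i, (l.foldl (fun d kv =>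
              d.insert kv.2 (PySem.List.sorted (d.getD kv.2 [] ++ [kv.1]) (fun c => c) false)) d).getD i []
        = PySem.List.sorted (d.getD i [] ++ (l.filter (fun p => p.2 == i)).map Prod.fst) (fun c => c) false := by
  induction l with
  | nil => intro d h i; simpa using h i
  | cons kv t ih =>
    intro d h i
    simp only [List.foldl_cons]
    set d' := d.insert kv.2 (PySem.List.sorted (d.getD kv.2 [] ++ [kv.1]) (fun c => c) false) with hd'
    have h' : ∀ j, d'.getD j [] = PySem.List.sorted (d'.getD j []) (fun c => c) false := by
      intro j
      by_cases hj : j = kv.2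
      · subst hj
        rw [hd', PySem.Dict.getD_insert_self, PySem.List.sorted_sorted]
      · rw [hd', PySem.Dict.getD_insert_of_ne _ _ _ hj, ← h j]
    rw [ih d' h' i]
    by_cases hi : kv.2 = i
    · subst hi
      rw [hd', PySem.Dict.getD_insert_self]
      have hperm : (PySem.List.sorted (d.getD kv.2 [] ++ [kv.1]) (fun c => c) false
          ++ (t.filter (fun p => p.2 == kv.2)).map Prod.fst).Perm
          ((d.getD kv.2 [] ++ [kv.1]) ++ (t.filter (fun p => p.2 == kv.2)).map Prod.fst) :=
        (PySem.List.sorted_perm _ _ _).append_right _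
      rw [PySem.List.sorted_eq_sorted_of_perm _ _ _ (fun a b hab => hab) hperm]
      simp
    · rw [hd', PySem.Dict.getD_insert_of_ne _ _ _ (fun he => hi he.symm)]
      have : ((kv :: t).filter (fun p => p.2 == i)) = t.filter (fun p => p.2 == i) := by
        simp [hi]
      rw [this]

theorem pv_inv_keys (l : List (Char × Int)) :
    ∀ (d : PySem.Dict Int (List Char)) (j : Int),
      (j ∈ (l.foldl (fun d kv =>
            d.insert kv.2 (PySem.List.sorted (d.getD kv.2 [] ++ [kv.1]) (fun c => c) false)) d).keys
        ↔ j ∈ d.keys ∨ ∃ p ∈ l, p.2 = j) := by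
  induction l with
  | nil => intro d j; simp
  | cons kv t ih =>
    intro d j
    simp only [List.foldl_cons, ih, PySem.Dict.mem_keys_insert, List.mem_cons]
    constructor
    · rintro ((h | h) | ⟨p, hp, he⟩)
      · exact Or.inr ⟨kv, Or.inl rfl, h.symm⟩
      · exact Or.inl h
      · exact Or.inr ⟨p, Or.inr hp, he⟩
    · rintro (h | ⟨p, (rfl | hp), he⟩)
      · exact Or.inl (Or.inr h)
      · exact Or.inl (Or.inl he.symm)
      · exact Or.inr ⟨p, hp, he⟩

theorem pv_mem_bucket (F : List Char) (i : Int) (c : Char) :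
    c ∈ pvBucketL F i ↔ c ∈ F ∧ pvCnt F c = i := by
  unfold pvBucketL
  rw [PySem.List.mem_sorted]
  simp [PySem.Set.mem_ofList]

theorem pv_bucket_pairwise (m : Int) (F : List Char) (i : Int) :
    (pvBucketL F i).Pairwise (fun a b => pvKey m F a < pvKey m F b) := by
  have hnd : (pvBucketL F i).Nodup :=
    ((PySem.List.sorted_perm _ _ _).nodup_iff).mpr ((PySem.Set.nodup_ofList F).filter _)
  have hle : (pvBucketL F i).Pairwise (fun a b : Char => a ≤ b) := PySem.List.sorted_pairwise _ _
  refine (hle.and hnd).imp_of_mem ?_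
  rintro a b ha hb ⟨h1, h2⟩
  have hac := ((pv_mem_bucket F i a).mp ha).2
  have hbc := ((pv_mem_bucket F i b).mp hb).2
  unfold pvKey
  rw [Prod.Lex.toLex_lt_toLex]
  right
  exact ⟨by rw [hac, hbc], lt_of_le_of_ne h1 h2⟩

theorem pv_flat_pairwise (m : Int) (F : List Char) (is : List Int)
    (hdesc : is.Pairwise (fun a b => b < a)) :
    (is.flatMap (fun i => pvBucketL F i)).Pairwise (fun a b => pvKey m F a < pvKey m F b) := by
  induction is with
  | nil => simp
  | cons i t ih =>
    rw [List.pairwise_cons] at hdesc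
    rw [List.flatMap_cons, List.pairwise_append]
    refine ⟨pv_bucket_pairwise m F i, ih hdesc.2, ?_⟩
    intro a ha b hb
    obtain ⟨j, hj, hbj⟩ := List.mem_flatMap.mp hb
    have hac := (pv_mem_bucket F i a).mp ha
    have hbc := (pv_mem_bucket F j b).mp hbj
    have hji : j < i := hdesc.1 j hj
    unfold pvKey
    rw [Prod.Lex.toLex_lt_toLex]
    left
    show m - pvCnt F a < m - pvCnt F b
    omega

theorem pv_pyRange_desc (m : Int) :
    (PySem.List.pyRange m 0 (-1)).Pairwise (fun a b => b < a) := by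
  rw [PySem.List.pyRange_neg_one]
  exact List.pairwise_lt_range.map _ (by intro a b h; omega)

theorem pv_fm (K : List Char) (f : Char → Int) (i : Int) :
    (((K.map (fun k => (k, f k))).filter (fun p => p.2 == i)).map Prod.fst)
      = K.filter (fun c => f c == i) := by
  rw [List.filter_map, List.map_map]
  simp [Function.comp_def]

theorem pv_keys_iff (F : List Char) (j : Int) :
    (j ∈ (((PySem.Dict.counter F).items.foldl
        (fun d kv => d.insert kv.2 (PySem.List.sorted (d.getD kv.2 [] ++ [kv.1]) (fun c => c) false))
        PySem.Dict.empty).keys) ↔ ∃ c ∈ F, pvCnt F c = j) := by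
  rw [pv_inv_keys _ PySem.Dict.empty j, PySem.Dict.items_counter]
  constructor
  · rintro (h | ⟨p, hp, he⟩)
    · simp at h
    · obtain ⟨c, hc, rfl⟩ := List.mem_map.mp hp
      exact ⟨c, (PySem.Set.mem_ofList F c).mp hc, he⟩
  · rintro ⟨c, hc, he⟩
    exact Or.inr ⟨(c, (F.count c : Int)), List.mem_map.mpr ⟨c, (PySem.Set.mem_ofList F c).mpr hc, rfl⟩, he⟩

theorem pv_keys_ne (F : List Char) (hpre : F ≠ []) :
    ∃ m : Int, PySem.List.max?
        (((PySem.Dict.counter F).items.foldl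
          (fun d kv => d.insert kv.2 (PySem.List.sorted (d.getD kv.2 [] ++ [kv.1]) (fun c => c) false))
          PySem.Dict.empty).keys) (fun i => i) = some m := by
  cases hmax : PySem.List.max?
      (((PySem.Dict.counter F).items.foldl
        (fun d kv => d.insert kv.2 (PySem.List.sorted (d.getD kv.2 [] ++ [kv.1]) (fun c => c) false))
        PySem.Dict.empty).keys) (fun i => i) with
  | none =>
    exfalso
    obtain ⟨c, hc⟩ := List.exists_mem_of_ne_nil F hpre
    have hmem := (pv_keys_iff F (pvCnt F c)).mpr ⟨c, hc, rfl⟩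
    rw [(PySem.List.max?_eq_none_iff _ _).mp hmax] at hmem
    simp at hmem
  | some m => exact ⟨m, rfl⟩

theorem pv_values_eq (F : List Char) :
    (PySem.Dict.counter F).values = (PySem.Set.ofList F).map (fun k => (F.count k : Int)) := by
  show (PySem.Dict.counter F).items.map Prod.snd = _
  rw [PySem.Dict.items_counter, List.map_map]
  rfl

theorem pv_values_max (F : List Char) (m : Int)
    (hmA : PySem.List.max?
        (((PySem.Dict.counter F).items.foldl
          (fun d kv => d.insert kv.2 (PySem.List.sorted (d.getD kv.2 [] ++ [kv.1]) (fun c => c) false))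
          PySem.Dict.empty).keys) (fun i => i) = some m) :
    PySem.List.max? (PySem.Dict.counter F).values (fun v => v) = some m := by
  cases hmB : PySem.List.max? (PySem.Dict.counter F).values (fun v => v) with
  | none =>
    exfalso
    rw [PySem.List.max?_eq_none_iff, pv_values_eq] at hmB
    obtain ⟨c, hc, _⟩ := (pv_keys_iff F m).mp (PySem.List.max?_mem hmA)
    have : (F.count c : Int) ∈ (PySem.Set.ofList F).map (fun k => (F.count k : Int)) :=
      List.mem_map.mpr ⟨c, (PySem.Set.mem_ofList F c).mpr hc, rfl⟩
    rw [hmB] at this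
    simp at this
  | some m' =>
    -- m' ≤ m : m' is the count of some letter, and every count is ≤ m
    obtain ⟨c', hc', he'⟩ := List.mem_map.mp (by
      have := PySem.List.max?_mem hmB
      rwa [pv_values_eq] at this)
    have h1 : m' ≤ m := by
      rw [← he']
      exact PySem.List.max?_isMax hmA _
        ((pv_keys_iff F _).mpr ⟨c', (PySem.Set.mem_ofList F c').mp hc', rfl⟩)
    -- m ≤ m' : m is the count of some letter, and m' bounds every count
    obtain ⟨c, hc, he⟩ := (pv_keys_iff F m).mp (PySem.List.max?_mem hmA)
    have h2 : m ≤ m' := by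
      rw [← he]
      exact PySem.List.max?_isMax hmB _ (by
        rw [pv_values_eq]
        exact List.mem_map.mpr ⟨c, (PySem.Set.mem_ofList F c).mpr hc, rfl⟩)
    have : m' = m := le_antisymm h1 h2
    rw [this]

theorem pv_core (F : List Char) (cs : List Char) (m : Int)
    (hmax : PySem.List.max?
        (((PySem.Dict.counter F).items.foldl
          (fun d kv => d.insert kv.2 (PySem.List.sorted (d.getD kv.2 [] ++ [kv.1]) (fun c => c) false))
          PySem.Dict.empty).keys) (fun i => i) = some m) :
    (((PySem.List.pyRange m 0 (-1)).foldl
        (fun acc i => acc ++ ((PySem.Dict.counter F).items.foldl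
          (fun d kv => d.insert kv.2 (PySem.List.sorted (d.getD kv.2 [] ++ [kv.1]) (fun c => c) false))
          PySem.Dict.empty).getD i []) []).take 5 == cs)
    = (((PySem.List.sorted2 (PySem.Dict.counter F).keys
          (fun c => m - (PySem.Dict.counter F).getD c 0) (fun c => c) false).take 5) == cs) := by
  have hempty : ∀ j : Int, (PySem.Dict.empty : PySem.Dict Int (List Char)).getD j []
      = PySem.List.sorted ((PySem.Dict.empty : PySem.Dict Int (List Char)).getD j []) (fun c => c) false := by
    intro j; rfl
  set inverse := (PySem.Dict.counter F).items.foldl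
      (fun d kv => d.insert kv.2 (PySem.List.sorted (d.getD kv.2 [] ++ [kv.1]) (fun c => c) false))
      PySem.Dict.empty with hinv
  have hbucket : ∀ i : Int, inverse.getD i [] = pvBucketL F i := by
    intro i
    rw [hinv, pv_inv_bucket _ PySem.Dict.empty hempty i, PySem.Dict.items_counter]
    have hnil : (PySem.Dict.empty : PySem.Dict Int (List Char)).getD i [] = [] := rfl
    rw [hnil, List.nil_append, pv_fm, pvBucketL]
    rfl
  have hBkey : (fun c : Char => toLex (m - (PySem.Dict.counter F).getD c 0, c)) = (fun c : Char => pvKey m F c) := by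
    funext c
    rw [PySem.Dict.getD_counter, pvKey, pvCnt]
  rw [pv_sorted2_lex, hBkey, PySem.Dict.keys_counter]
  have hub : ∀ c ∈ F, pvCnt F c ≤ m := by
    intro c hc
    exact PySem.List.max?_isMax hmax (pvCnt F c) ((pv_keys_iff F _).mpr ⟨c, hc, rfl⟩)
  rw [PySem.List.foldl_append_eq_flatMap]
  have hfun : (fun i => inverse.getD i []) = fun i => pvBucketL F i := funext hbucket
  rw [hfun, List.nil_append]
  set flat := (PySem.List.pyRange m 0 (-1)).flatMap (fun i => pvBucketL F i) with hflat
  have hpw : flat.Pairwise (fun a b => pvKey m F a < pvKey m F b) :=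
    pv_flat_pairwise m F _ (pv_pyRange_desc m)
  have hnd : flat.Nodup := hpw.imp (fun {a b} h => fun he => by rw [he] at h; exact lt_irrefl _ h)
  have hmem : ∀ c : Char, c ∈ flat ↔ c ∈ PySem.Set.ofList F := by
    intro c
    rw [hflat, List.mem_flatMap, PySem.Set.mem_ofList]
    constructor
    · rintro ⟨i, _, hb⟩
      exact ((pv_mem_bucket F i c).mp hb).1
    · intro hc
      refine ⟨pvCnt F c, ?_, (pv_mem_bucket F _ c).mpr ⟨hc, rfl⟩⟩
      rw [PySem.List.mem_pyRange_neg_one]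
      have h1 : 0 < F.count c := List.count_pos_iff.mpr hc
      have h2 := hub c hc
      unfold pvCnt at *
      omega
  have hperm : flat.Perm (PySem.Set.ofList F) :=
    (List.perm_ext_iff_of_nodup hnd (PySem.Set.nodup_ofList F)).mpr hmem
  have hs : PySem.List.sorted (PySem.Set.ofList F) (fun c => pvKey m F c) false = flat :=
    PySem.List.sorted_eq_of_perm_of_pairwise_lt _ _ (fun c => pvKey m F c) hperm hpw
  rw [hs]

theorem pv_main (line : String) (hpre : pvCode line ≠ []) :
    room_is_real line = room_is_real_alt line := by
  obtain ⟨m, hmA⟩ := pv_keys_ne (pvCode line) hpre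
  have hmB := pv_values_max (pvCode line) m hmA
  unfold room_is_real room_is_real_alt pvInverse pvCounter
  rw [hmA, hmB]
  exact pv_core (pvCode line) _ m hmA

-- ===== VERDICT =====
theorem room_is_real_spec : Claim_equal_room_is_real := by
  intro line _ hpre
  unfold Spec_room_is_real
  exact pv_main line hpre
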